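-- pv_equiv track=rewrite | github.com/Ampermetr123/otus-algo | mygraph/mst.py | get_sorted_edges
-- ===== SOURCE A (Python) =====
-- from typing import List, Set, Tuple, Union
--
-- Edge = Tuple[int, int]  # ребро
--
-- AdjencyMatrix = List[
--     List[Union[int, None]]
-- ]  # граф, представленный матрицей смежности
--
-- def get_sorted_edges(gm: AdjencyMatrix) -> List[Edge]:
--     """
--     Из неориентированного графа, представленного матрицей смежности,
--     получаем список ребер, отсортированных в порядке возрастания весов
--     """
--     edges: List[Edge] = []
--     sz = len(gm)
--
--     # Проход по верхней диагонали матрицы графа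
--     for a in range(sz):
--         for b in range(a, sz):
--             w = gm[a][b]
--             if w is None:
--                 continue
--             # Сортировка вставкой используется для учебных целей.
--             # можно использовать встроенную функцию сортировки списка или heapq
--             i = 0
--             while i < len(edges) and gm[edges[i][0]][edges[i][1]] < w:  # type: ignore
--                 i += 1
--             edges.insert(i, (a, b))
--     return edges
-- ===== SOURCE B (Python) =====
-- def get_sorted_edges(gm):
--     """
--     Из неориентированного графа, представленного матрицей смежности,
--     получаем список ребер, отсортированных в порядке возрастания весов
--     """
--     sz = len(gm)
--     edges = [(a, b) for a in range(sz) for b in range(a, sz) if gm[a][b] is not None]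
--     # A's insertion places each new edge BEFORE earlier edges of equal weight,
--     # so equal-weight edges end up in reverse discovery order: reverse first,
--     # then a stable sort on weight reproduces that order exactly.
--     edges.reverse()
--     edges.sort(key=lambda e: gm[e[0]][e[1]])
--     return edges
-- ===== Notes on version B (the rewrite author's own statement) =====
-- stated objective: faster
-- what changed: A insertion-sorts each discovered edge into the result with a linear scan; B collects all upper-triangle edges in one comprehension, reverses the list, and does a single stable built-in sort on weight (reversing first reproduces A's before-equals insertion tie order).
import Mathlib
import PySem

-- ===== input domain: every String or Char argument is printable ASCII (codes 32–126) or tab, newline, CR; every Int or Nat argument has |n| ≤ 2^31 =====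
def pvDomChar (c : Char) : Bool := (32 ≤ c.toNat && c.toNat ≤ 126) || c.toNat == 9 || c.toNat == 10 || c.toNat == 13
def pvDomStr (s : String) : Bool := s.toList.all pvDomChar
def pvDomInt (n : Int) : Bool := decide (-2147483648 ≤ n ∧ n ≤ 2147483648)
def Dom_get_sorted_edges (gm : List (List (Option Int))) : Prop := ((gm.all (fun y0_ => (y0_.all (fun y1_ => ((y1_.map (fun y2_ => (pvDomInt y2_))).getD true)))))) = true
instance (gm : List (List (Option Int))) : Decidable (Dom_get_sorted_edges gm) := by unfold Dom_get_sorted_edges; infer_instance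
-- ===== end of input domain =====

-- B replaces A's per-edge insertion sort by collecting the upper-triangle edges once and
-- doing a single stable sort on weight of the reversed list (simpler and O(E log E) vs O(E^2)).

-- ===== PORT A =====
-- gm[a][b] : `some (some w)` = weight w, `some none` = stored None, `none` = IndexError
def pvWa (gm : List (List (Option Int))) (a b : Int) : Option (Option Int) :=
  (PySem.List.pyGet? gm a).bind (fun row => PySem.List.pyGet? row b)

-- weight of an edge already stored in the list (A's while-condition, B's sort key);
-- stored edges always have an in-range non-None weight, so the default 0 is never consulted
def pvWta (gm : List (List (Option Int))) (e : Int × Int) : Int :=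
  ((pvWa gm e.1 e.2).join).getD 0

-- A's `while i < len(edges) and gm[edges[i][0]][edges[i][1]] < w: i += 1; edges.insert(i, e)`:
-- walk past edges of smaller weight, insert before the first edge of weight ≥ w
def pvInsEdge (gm : List (List (Option Int))) (w : Int) (e : Int × Int) :
    List (Int × Int) → List (Int × Int)
  | [] => [e]
  | y :: t => if pvWta gm y < w then y :: pvInsEdge gm w e t else e :: y :: t

def get_sorted_edges (gm : List (List (Option Int))) : List (Int × Int) :=
  (PySem.List.pyRange 0 (gm.length : Int) 1).foldl (fun edges a =>
    (PySem.List.pyRange a (gm.length : Int) 1).foldl (fun edges b =>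
      match pvWa gm a b with
      | some (some w) => pvInsEdge gm w (a, b) edges
      | _ => edges) edges) []

-- ===== PORT B =====
-- B's own gm[a][b] lookup and sort key (same meaning as A's, duplicated so the ports share no code)
def pvWb (gm : List (List (Option Int))) (a b : Int) : Option (Option Int) :=
  (PySem.List.pyGet? gm a).bind (fun row => PySem.List.pyGet? row b)

def pvWtb (gm : List (List (Option Int))) (e : Int × Int) : Int :=
  ((pvWb gm e.1 e.2).join).getD 0

def get_sorted_edges_alt (gm : List (List (Option Int))) : List (Int × Int) :=
  let sz : Int := (gm.length : Int)
  let edges := (PySem.List.pyRange 0 sz 1).flatMap (fun a =>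
    (PySem.List.pyRange a sz 1).filterMap (fun b =>
      match pvWb gm a b with
      | some (some _) => some (a, b)
      | some none => none
      | none => none))
  PySem.List.sorted edges.reverse (fun e => pvWtb gm e) false

-- ===== PRECONDITION & SPEC =====
-- Pre_ excludes exactly the ragged matrices on which Python A raises IndexError
-- (some accessed row is shorter than len(gm)); A returns normally on all other inputs.
def Pre_get_sorted_edges (gm : List (List (Option Int))) : Prop :=
  ∀ row ∈ gm, gm.length ≤ row.length

instance (gm : List (List (Option Int))) : Decidable (Pre_get_sorted_edges gm) := by
  unfold Pre_get_sorted_edges; infer_instance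

def pvWitness_get_sorted_edges : List (List (Option Int)) :=
  [[some 1, none], [none, some 0]]

def Spec_get_sorted_edges (gm : List (List (Option Int))) (out : List (Int × Int)) : Prop := out = get_sorted_edges_alt gm
instance (gm : List (List (Option Int))) (out : List (Int × Int)) : Decidable (Spec_get_sorted_edges gm out) := by unfold Spec_get_sorted_edges; infer_instance

-- ===== CLAIM (what is proved, stated in full; the proofs are below) =====
def Claim_equal_get_sorted_edges : Prop := ∀ (gm : List (List (Option Int))), Dom_get_sorted_edges gm → Pre_get_sorted_edges gm → Spec_get_sorted_edges gm (get_sorted_edges gm)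

-- ===== LEMMAS AND PROOFS =====

-- the discovery list (B's comprehension)
def pvL (gm : List (List (Option Int))) : List (Int × Int) :=
  (PySem.List.pyRange 0 (gm.length : Int) 1).flatMap (fun a =>
    (PySem.List.pyRange a (gm.length : Int) 1).filterMap (fun b =>
      match pvWa gm a b with
      | some (some _) => some (a, b)
      | some none => none
      | none => none))

-- B's "reverse then stable-sort" comparator
def pvBef (gm : List (List (Option Int))) (x y : Int × Int) : Bool :=
  decide (pvWta gm x < pvWta gm y)

-- A's nested range loops are the insertion fold over the discovery list
theorem pvA_eq_foldl (gm : List (List (Option Int))) :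
    get_sorted_edges gm =
      (pvL gm).foldl (fun acc e => pvInsEdge gm (pvWta gm e) e acc) [] := by
  unfold get_sorted_edges pvL
  rw [List.foldl_flatMap]
  refine PySem.List.foldl_congr_mem _ _ _ _ (fun acc a _ => ?_)
  rw [List.foldl_filterMap]
  refine PySem.List.foldl_congr_mem _ _ _ _ (fun acc' b _ => ?_)
  rcases h : pvWa gm a b with _ | (_ | w) <;> simp [pvWta, h]

-- B is the right fold of `insertBy` over the discovery list
theorem pvB_eq_foldr (gm : List (List (Option Int))) :
    get_sorted_edges_alt gm =
      (pvL gm).foldr (fun e acc => PySem.List.insertBy (pvBef gm) e acc) [] := by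
  unfold get_sorted_edges_alt
  rw [PySem.List.sorted_eq_foldl_insertBy, List.foldl_reverse]
  rfl

-- inserting before-equal-weights (A) commutes with inserting after-equal-weights (B)
-- unfolding equations for the two insertion routines
theorem pvInsertBy_lt (gm : List (List (Option Int))) (e y : Int × Int)
    (t : List (Int × Int)) (h : pvWta gm e < pvWta gm y) :
    PySem.List.insertBy (pvBef gm) e (y :: t) = e :: y :: t := by
  simp [PySem.List.insertBy, pvBef, h]

theorem pvInsertBy_ge (gm : List (List (Option Int))) (e y : Int × Int)
    (t : List (Int × Int)) (h : ¬ pvWta gm e < pvWta gm y) :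
    PySem.List.insertBy (pvBef gm) e (y :: t) = y :: PySem.List.insertBy (pvBef gm) e t := by
  simp [PySem.List.insertBy, pvBef, h]

theorem pvInsEdge_lt (gm : List (List (Option Int))) (w : Int) (x y : Int × Int)
    (t : List (Int × Int)) (h : pvWta gm y < w) :
    pvInsEdge gm w x (y :: t) = y :: pvInsEdge gm w x t := by
  simp [pvInsEdge, h]

theorem pvInsEdge_ge (gm : List (List (Option Int))) (w : Int) (x y : Int × Int)
    (t : List (Int × Int)) (h : ¬ pvWta gm y < w) :
    pvInsEdge gm w x (y :: t) = x :: y :: t := by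
  simp [pvInsEdge, h]

-- inserting before-equal-weights (A) commutes with inserting after-equal-weights (B)
theorem pvIns_comm (gm : List (List (Option Int))) (x e : Int × Int)
    (acc : List (Int × Int)) :
    pvInsEdge gm (pvWta gm x) x (PySem.List.insertBy (pvBef gm) e acc) =
      PySem.List.insertBy (pvBef gm) e (pvInsEdge gm (pvWta gm x) x acc) := by
  induction acc with
  | nil =>
    by_cases h : pvWta gm e < pvWta gm x <;>
      simp [pvInsEdge, PySem.List.insertBy, pvBef, h]
  | cons y t ih =>
    by_cases h1 : pvWta gm e < pvWta gm y
    · by_cases h2 : pvWta gm y < pvWta gm x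
      · have h3 : pvWta gm e < pvWta gm x := by omega
        rw [pvInsertBy_lt gm e y t h1, pvInsEdge_lt gm _ x e _ h3,
          pvInsEdge_lt gm _ x y t h2, pvInsertBy_lt gm e y _ h1]
      · by_cases h3 : pvWta gm e < pvWta gm x
        · rw [pvInsertBy_lt gm e y t h1, pvInsEdge_lt gm _ x e _ h3,
            pvInsEdge_ge gm _ x y t h2, pvInsertBy_lt gm e x _ h3]
        · rw [pvInsertBy_lt gm e y t h1, pvInsEdge_ge gm _ x e _ h3,
            pvInsEdge_ge gm _ x y t h2, pvInsertBy_ge gm e x _ h3,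
            pvInsertBy_lt gm e y t h1]
    · by_cases h2 : pvWta gm y < pvWta gm x
      · rw [pvInsertBy_ge gm e y t h1, pvInsEdge_lt gm _ x y _ h2,
          pvInsEdge_lt gm _ x y t h2, ih, pvInsertBy_ge gm e y _ h1]
      · have h3 : ¬ pvWta gm e < pvWta gm x := by omega
        rw [pvInsertBy_ge gm e y t h1, pvInsEdge_ge gm _ x y _ h2,
          pvInsEdge_ge gm _ x y t h2, pvInsertBy_ge gm e x _ h3,
          pvInsertBy_ge gm e y t h1]

theorem pvFoldl_insertBy (gm : List (List (Option Int))) (L : List (Int × Int))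
    (e : Int × Int) (acc : List (Int × Int)) :
    L.foldl (fun acc x => pvInsEdge gm (pvWta gm x) x acc)
        (PySem.List.insertBy (pvBef gm) e acc) =
      PySem.List.insertBy (pvBef gm)
        e (L.foldl (fun acc x => pvInsEdge gm (pvWta gm x) x acc) acc) := by
  induction L generalizing acc with
  | nil => rfl
  | cons x L ih => simp only [List.foldl_cons, pvIns_comm, ih]

theorem pvFoldl_eq_foldr (gm : List (List (Option Int))) (L : List (Int × Int)) :
    L.foldl (fun acc e => pvInsEdge gm (pvWta gm e) e acc) [] =
      L.foldr (fun e acc => PySem.List.insertBy (pvBef gm) e acc) [] := by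
  induction L with
  | nil => rfl
  | cons x L ih =>
    simp only [List.foldl_cons, List.foldr_cons, ← ih]
    have : pvInsEdge gm (pvWta gm x) x [] = PySem.List.insertBy (pvBef gm) x [] := rfl
    rw [this, pvFoldl_insertBy]

-- ===== VERDICT (by name: the statement is the Claim_ definition above) =====
theorem get_sorted_edges_spec : Claim_equal_get_sorted_edges := by
  intro gm _ _
  unfold Spec_get_sorted_edges
  rw [pvA_eq_foldl, pvB_eq_foldr, pvFoldl_eq_foldr]
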